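-- pv_equiv track=rewrite | github.com/SDhn2a/math400 | geodesic_permutations.py | standard_order
-- ===== SOURCE A (Python) =====
-- def standard_order(transposition_list):
--     new_t_list = transposition_list
--     for t in range(len(new_t_list)-1):
--         transposition = new_t_list[t]
--         next_transposition = new_t_list[t+1]
--         if transposition+1 < next_transposition:
--             new_t_list[t] = next_transposition
--             new_t_list[t+1] = transposition
--             return standard_order(new_t_list)
--     return new_t_list
-- ===== SOURCE B (Python) =====
-- def standard_order(transposition_list):
--     a = list(transposition_list)
--     t = 0
--     n = len(a)
--     while t + 1 < n:
--         if a[t] + 1 < a[t + 1]: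
--             a[t], a[t + 1] = a[t + 1], a[t]
--             t = t - 1 if t > 0 else 0
--         else:
--             t += 1
--     return a
-- ===== Notes on version B (the rewrite author's own statement) =====
-- stated objective: alternative
-- what changed: Replaces the restart-from-the-beginning recursion after every swap by a single iterative pass whose pointer backs up one position after a swap (fewer rescans per swap; B also leaves its argument unmutated, A mutates it in place).
import Mathlib
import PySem

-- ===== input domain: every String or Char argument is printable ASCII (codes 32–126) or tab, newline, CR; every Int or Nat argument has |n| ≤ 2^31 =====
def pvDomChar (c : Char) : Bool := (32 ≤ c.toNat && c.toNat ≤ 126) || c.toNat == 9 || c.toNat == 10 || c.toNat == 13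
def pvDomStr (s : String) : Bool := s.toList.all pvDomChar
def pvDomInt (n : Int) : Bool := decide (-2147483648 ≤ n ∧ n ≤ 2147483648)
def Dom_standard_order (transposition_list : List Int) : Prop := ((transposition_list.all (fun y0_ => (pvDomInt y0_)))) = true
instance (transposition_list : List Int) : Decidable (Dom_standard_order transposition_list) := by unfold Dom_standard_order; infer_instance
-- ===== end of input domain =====

-- B replaces A's restart-from-the-beginning recursion after every swap by one iterative pass whose
-- pointer backs up one position after a swap (an alternative algorithm, not claimed faster); the
-- proved equivalence is about the RETURN value only (Python A mutates its argument list in place,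
-- B does not).


-- termination measure for both ports: number of ascending pairs (i < j with l[i] < l[j]);
-- each conditional swap removes exactly one such pair
def soInv : List Int → Nat
  | [] => 0
  | x :: xs => xs.countP (fun y => decide (x < y)) + soInv xs

theorem soInv_append_swap (p : List Int) (x y : Int) (s : List Int) (h : x < y) :
    soInv (p ++ y :: x :: s) + 1 = soInv (p ++ x :: y :: s) := by
  induction p with
  | nil =>
    simp [soInv, h, not_lt.mpr (le_of_lt h)]
    omega
  | cons a rest ih =>
    simp only [List.cons_append, soInv, List.countP_append, List.countP_cons]
    omega

-- ===== PORT A =====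
-- the in-place double assignment new_t_list[t] = next_transposition; new_t_list[t+1] = transposition
def soSwap (l : List Int) (t : Nat) : List Int :=
  (l.set t (l.getD (t + 1) 0)).set (t + 1) (l.getD t 0)

theorem soSwap_eq (l : List Int) (t : Nat) (h : t + 1 < l.length) :
    soSwap l t = l.take t ++ l.getD (t + 1) 0 :: l.getD t 0 :: l.drop (t + 2) := by
  induction t generalizing l with
  | zero =>
    match l, h with
    | x :: y :: s, _ => simp [soSwap]
  | succ t ih =>
    match l, h with
    | a :: l', h =>
      have h' : t + 1 < l'.length := by simpa using h
      have := ih l' h'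
      simp [soSwap, List.take_succ_cons] at this ⊢
      simpa [soSwap] using this

theorem take_getD_drop (l : List Int) (t : Nat) (h : t + 1 < l.length) :
    l.take t ++ l.getD t 0 :: l.getD (t + 1) 0 :: l.drop (t + 2) = l := by
  induction t generalizing l with
  | zero =>
    match l, h with
    | x :: y :: s, _ => simp
  | succ t ih =>
    match l, h with
    | a :: l', h =>
      have h' : t + 1 < l'.length := by simpa using h
      simpa using ih l' h'

theorem soSwap_inv (l : List Int) (t : Nat) (hlen : t + 1 < l.length)
    (hlt : l.getD t 0 < l.getD (t + 1) 0) : soInv (soSwap l t) + 1 = soInv l := by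
  rw [soSwap_eq l t hlen]
  conv_rhs => rw [← take_getD_drop l t hlen]
  exact soInv_append_swap _ _ _ _ hlt

theorem soSwap_length (l : List Int) (t : Nat) : (soSwap l t).length = l.length := by
  simp [soSwap]

theorem so_dec_scan (n t : Nat) (h : t + 1 < n) : n - (t + 1) < n - t := by omega

-- A's for-loop: scan from index t for the first adjacent pair with l[t] + 1 < l[t+1]
def soScan (l : List Int) (t : Nat) : Option Nat :=
  if t + 1 < l.length then
    if l.getD t 0 + 1 < l.getD (t + 1) 0 then some t
    else soScan l (t + 1)
  else none
termination_by l.length - t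
decreasing_by exact so_dec_scan l.length t (by assumption)

theorem soScan_some (l : List Int) (j t : Nat) (h : soScan l j = some t) :
    t + 1 < l.length ∧ l.getD t 0 + 1 < l.getD (t + 1) 0 := by
  induction j using soScan.induct l with
  | case1 j hlen hv => rw [soScan, if_pos hlen, if_pos hv] at h; cases h; exact ⟨hlen, hv⟩
  | case2 j hlen hv ih => rw [soScan, if_pos hlen, if_neg hv] at h; exact ih h
  | case3 j hlen => rw [soScan, if_neg hlen] at h; cases h

theorem so_dec_A (l : List Int) (t : Nat) (h : soScan l 0 = some t) :
    soInv (soSwap l t) < soInv l := by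
  have ⟨h1, h2⟩ := soScan_some _ _ _ h
  have := soSwap_inv _ _ h1 (by omega)
  omega

-- on a found swap A restarts itself on the swapped list
def standard_order (transposition_list : List Int) : List Int :=
  match h : soScan transposition_list 0 with
  | some t => standard_order (soSwap transposition_list t)
  | none => transposition_list
termination_by soInv transposition_list
decreasing_by exact so_dec_A transposition_list t h

theorem so_dec_B_swap (a : List Int) (t : Nat) (h1 : t + 1 < a.length)
    (h2 : a.getD t 0 + 1 < a.getD (t + 1) 0) :
    soInv ((a.set t (a.getD (t + 1) 0)).set (t + 1) (a.getD t 0)) *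
        (((a.set t (a.getD (t + 1) 0)).set (t + 1) (a.getD t 0)).length + 1) +
        (((a.set t (a.getD (t + 1) 0)).set (t + 1) (a.getD t 0)).length - (t - 1)) <
      soInv a * (a.length + 1) + (a.length - t) := by
  have hswap : ((a.set t (a.getD (t + 1) 0)).set (t + 1) (a.getD t 0)) = soSwap a t := rfl
  rw [hswap, soSwap_length]
  have := soSwap_inv a t h1 (by omega)
  nlinarith [Nat.sub_le a.length (t - 1)]

theorem so_dec_B_adv (m n t : Nat) (h : t + 1 < n) :
    m * (n + 1) + (n - (t + 1)) < m * (n + 1) + (n - t) := by omega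

-- ===== PORT B =====
-- B's single while-loop: advance t, swap and back up one position on a violation
def soLoop (a : List Int) (t : Nat) : List Int :=
  if t + 1 < a.length then
    let x := a.getD t 0
    let y := a.getD (t + 1) 0
    if x + 1 < y then soLoop ((a.set t y).set (t + 1) x) (t - 1)
    else soLoop a (t + 1)
  else a
termination_by soInv a * (a.length + 1) + (a.length - t)
decreasing_by
  · exact so_dec_B_swap a t (by assumption) (by assumption)
  · exact so_dec_B_adv (soInv a) a.length t (by assumption)

def standard_order_alt (transposition_list : List Int) : List Int :=
  soLoop transposition_list 0

-- ===== PRECONDITION & SPEC =====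
def Spec_standard_order (transposition_list : List Int) (out : List Int) : Prop := out = standard_order_alt transposition_list
instance (transposition_list : List Int) (out : List Int) : Decidable (Spec_standard_order transposition_list out) := by unfold Spec_standard_order; infer_instance

-- ===== CLAIM (what is proved, stated in full; the proofs are below) =====
def Claim_equal_standard_order : Prop := ∀ (transposition_list : List Int), Dom_standard_order transposition_list → Spec_standard_order transposition_list (standard_order transposition_list)

-- ===== LEMMAS AND PROOFS =====
theorem soScan_eq_some (l : List Int) (t : Nat) (j : Nat) (hj : j ≤ t)
    (hok : ∀ i, j ≤ i → i < t → ¬ (l.getD i 0 + 1 < l.getD (i + 1) 0))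
    (hlen : t + 1 < l.length) (hv : l.getD t 0 + 1 < l.getD (t + 1) 0) :
    soScan l j = some t := by
  induction j using soScan.induct l with
  | case1 j h1 h2 =>
    rw [soScan, if_pos h1, if_pos h2]
    rcases Nat.lt_or_ge j t with hlt | hge
    · exact absurd h2 (hok j le_rfl hlt)
    · exact congrArg some (Nat.le_antisymm hj hge)
  | case2 j h1 h2 ih =>
    rw [soScan, if_pos h1, if_neg h2]
    have hjt : j < t := by
      rcases Nat.lt_or_ge j t with hlt | hge
      · exact hlt
      · exact absurd hv (Nat.le_antisymm hj hge ▸ h2)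
    exact ih hjt (fun i hi => hok i (Nat.le_of_succ_le hi))
  | case3 j h1 =>
    rcases Nat.lt_or_ge j t with hlt | hge
    · exact absurd (Nat.lt_of_le_of_lt (by omega) hlen) h1
    · exact absurd hlen ((Nat.le_antisymm hj hge) ▸ h1)

theorem soScan_eq_none (l : List Int) (j : Nat)
    (hok : ∀ i, j ≤ i → i + 1 < l.length → ¬ (l.getD i 0 + 1 < l.getD (i + 1) 0)) :
    soScan l j = none := by
  induction j using soScan.induct l with
  | case1 j h1 h2 => exact absurd h2 (hok j le_rfl h1)
  | case2 j h1 h2 ih => rw [soScan, if_pos h1, if_neg h2]; exact ih (fun i hi => hok i (by omega))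
  | case3 j h1 => rw [soScan, if_neg h1]

theorem soSwap_getD_lt (l : List Int) (t j : Nat) (hj : j < t) :
    (soSwap l t).getD j 0 = l.getD j 0 := by
  simp [soSwap, List.getD_eq_getElem?_getD, List.getElem?_set_ne (by omega : t + 1 ≠ j),
    List.getElem?_set_ne (by omega : t ≠ j)]

-- loop invariant of B: no violating pair strictly left of the pointer
def soOK (l : List Int) (t : Nat) : Prop :=
  ∀ i, i < t → i + 1 < l.length → ¬ (l.getD i 0 + 1 < l.getD (i + 1) 0)

theorem soLoop_eq (a : List Int) (t : Nat) : soOK a t → soLoop a t = standard_order a := by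
  induction a, t using soLoop.induct with
  | case1 a t h1 x y h2 ih =>
    intro hok
    have hswap : ((a.set t y).set (t + 1) x) = soSwap a t := rfl
    have hscan : soScan a 0 = some t :=
      soScan_eq_some a t 0 (Nat.zero_le _)
        (fun i _ hi => hok i hi (by omega)) h1 h2
    rw [soLoop, if_pos h1, if_pos h2, hswap]
    rw [standard_order, hscan]
    apply ih
    intro i hi hlen
    rw [hswap] at hlen ⊢
    rw [soSwap_getD_lt a t i (by omega), soSwap_getD_lt a t (i+1) (by omega)]
    exact hok i (by omega) (by rw [soSwap_length] at hlen; exact hlen)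
  | case2 a t h1 x y h2 ih =>
    intro hok
    rw [soLoop, if_pos h1, if_neg h2]
    apply ih
    intro i hi hlen
    rcases Nat.lt_or_ge i t with hlt | hge
    · exact hok i hlt hlen
    · have : i = t := by omega
      subst this; exact h2
  | case3 a t h1 =>
    intro hok
    rw [soLoop, if_neg h1]
    rw [standard_order, soScan_eq_none a 0 (fun i _ hlen => hok i (by omega) hlen)]

-- ===== VERDICT (by name: the statement is the Claim_ definition above) =====
theorem standard_order_spec : Claim_equal_standard_order := by
  intro l _
  unfold Spec_standard_order standard_order_alt
  exact (soLoop_eq l 0 (fun i hi => absurd hi (Nat.not_lt_zero i))).symm
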